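-- pv_equiv track=rewrite | github.com/Sigray-Lab/CSF-Panel-Discovery | DataProc/Scripts/05_peptide_feasibility.py | check_proteotypicity
-- ===== SOURCE A (Python) =====
-- def check_proteotypicity(peptides: list[str], all_sequences: dict) -> list[str]:
--     """Filter for proteotypic peptides (unique to one protein).
--
--     Simple approach: check if peptide substring occurs in only one
--     protein sequence in the reference set.
--
--     Parameters
--     ----------
--     peptides : candidate peptide sequences
--     all_sequences : dict mapping gene_symbol -> protein sequence
--         (from the same species)
--
--     Returns
--     -------
--     List of proteotypic peptides
--     """
--     proteotypic = []
--     for pep in peptides: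
--         n_hits = sum(1 for seq in all_sequences.values()
--                      if pep in seq)
--         if n_hits == 1:
--             proteotypic.append(pep)
--     return proteotypic
-- ===== SOURCE B (Python) =====
-- def check_proteotypicity(peptides: list[str], all_sequences: dict) -> list[str]:
--     """Filter for proteotypic peptides (unique to one protein).
--
--     Substring-index approach: instead of searching every peptide in every
--     sequence, enumerate each sequence's substrings of the relevant lengths
--     once, look them up in a hash set of the peptides, and count per peptide
--     in how many sequences it was found.
--     """
--     pepset = set(peptides)
--     lengths = {len(p) for p in pepset}
--     n_hits = {}
--     for seq in all_sequences.values():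
--         found = {seq[i:i + l] for l in lengths
--                  for i in range(len(seq) - l + 1)
--                  if seq[i:i + l] in pepset}
--         for p in found:
--             n_hits[p] = n_hits.get(p, 0) + 1
--     return [p for p in peptides if n_hits.get(p, 0) == 1]
-- ===== Notes on version B (the rewrite author's own statement) =====
-- stated objective: alternative
-- what changed: Replaced the per-peptide substring search over all sequences by a substring index: each sequence's windows of the peptide lengths are enumerated once and looked up in a hash set of peptides, counting containing sequences in a dict; peptides with count 1 are kept.
import Mathlib
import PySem

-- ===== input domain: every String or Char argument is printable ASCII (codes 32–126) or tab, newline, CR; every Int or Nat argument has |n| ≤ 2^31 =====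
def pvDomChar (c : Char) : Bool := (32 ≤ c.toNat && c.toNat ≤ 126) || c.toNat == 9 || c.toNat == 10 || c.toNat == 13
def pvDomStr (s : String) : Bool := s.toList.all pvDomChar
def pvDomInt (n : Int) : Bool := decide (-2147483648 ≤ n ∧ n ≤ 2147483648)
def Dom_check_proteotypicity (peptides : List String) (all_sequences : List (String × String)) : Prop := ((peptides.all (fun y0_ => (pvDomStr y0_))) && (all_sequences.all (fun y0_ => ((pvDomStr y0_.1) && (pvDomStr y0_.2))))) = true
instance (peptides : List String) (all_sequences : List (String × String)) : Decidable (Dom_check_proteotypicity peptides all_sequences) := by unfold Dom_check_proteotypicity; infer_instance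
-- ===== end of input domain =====

-- B replaces the per-peptide substring searches by a substring index (windows of the
-- peptide lengths looked up in a peptide hash set, counted per sequence); alternative algorithm.

-- ===== PORT A =====
def check_proteotypicity (peptides : List String) (all_sequences : List (String × String)) : List String :=
  peptides.foldl (fun proteotypic pep =>
    -- n_hits = sum(1 for seq in all_sequences.values() if pep in seq)
    if (((PySem.Dict.ofList all_sequences).values).map
          (fun seq => if PySem.Str.isIn pep seq then (1 : Int) else 0)).sum = 1
    then proteotypic ++ [pep] else proteotypic) []

-- ===== PORT B =====
-- the set comprehension {seq[i:i+l] for l in lengths for i in range(len(seq)-l+1) if seq[i:i+l] in pepset}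
def pvWindowsB (pepset : PySem.Set String) (lengths : PySem.Set Int) (seq : String) : List String :=
  lengths.flatMap (fun l =>
    ((PySem.List.pyRange 0 (PySem.Str.len seq - l + 1) 1).map
        (fun i => PySem.Str.slice seq (some i) (some (i + l)))).filter
      (fun w => pepset.contains w))

def check_proteotypicity_alt (peptides : List String) (all_sequences : List (String × String)) : List String :=
  let pepset : PySem.Set String := PySem.Set.ofList peptides
  let lengths : PySem.Set Int := PySem.Set.ofList (pepset.map (fun p => PySem.Str.len p))
  let n_hits : PySem.Dict String Int :=
    ((PySem.Dict.ofList all_sequences).values).foldl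
      (fun d seq =>
        (PySem.Set.ofList (pvWindowsB pepset lengths seq)).foldl
          (fun d p => d.modify p 0 (· + 1)) d)
      PySem.Dict.empty
  peptides.filter (fun p => n_hits.getD p 0 == 1)

-- ===== PRECONDITION & SPEC =====
def Spec_check_proteotypicity (peptides : List String) (all_sequences : List (String × String)) (out : List String) : Prop := out = check_proteotypicity_alt peptides all_sequences
instance (peptides : List String) (all_sequences : List (String × String)) (out : List String) : Decidable (Spec_check_proteotypicity peptides all_sequences out) := by unfold Spec_check_proteotypicity; infer_instance

-- ===== CLAIM (what is proved, stated in full; the proofs are below) =====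
def Claim_equal_check_proteotypicity : Prop := ∀ (peptides : List String) (all_sequences : List (String × String)), Dom_check_proteotypicity peptides all_sequences → Spec_check_proteotypicity peptides all_sequences (check_proteotypicity peptides all_sequences)

-- ===== LEMMAS AND PROOFS =====

-- A's loop is a filter on the hit count
theorem pv_a_eq_filter (peptides : List String) (vals : List String) :
    peptides.foldl (fun proteotypic pep =>
      if (vals.map (fun seq => if PySem.Str.isIn pep seq then (1 : Int) else 0)).sum = 1
      then proteotypic ++ [pep] else proteotypic) []
    = peptides.filter (fun pep => (vals.countP (fun seq => PySem.Str.isIn pep seq) : Int) == 1) := by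
  have h : (fun (acc : List String) pep =>
      if (vals.map (fun seq => if PySem.Str.isIn pep seq then (1 : Int) else 0)).sum = 1
      then acc ++ [pep] else acc)
      = (fun acc pep =>
        if (fun q => (vals.countP (fun seq => PySem.Str.isIn q seq) : Int) == 1) pep = true
        then acc ++ [(fun (x : String) => x) pep] else acc) := by
    funext a b
    rw [PySem.List.sum_map_ite_one_zero (fun seq => PySem.Str.isIn b seq) vals]
    simp
  rw [h, PySem.List.foldl_append_if, List.map_id_fun', id_eq, List.nil_append]

-- B's counting loop: the final count of p is the number of sequences whose window set contains p
theorem pv_counts (ps : PySem.Set String) (ls : PySem.Set Int) (vals : List String)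
    (d : PySem.Dict String Int) (p : String) :
    (vals.foldl (fun d seq =>
        (PySem.Set.ofList (pvWindowsB ps ls seq)).foldl
          (fun d q => d.modify q 0 (· + 1)) d) d).getD p 0
    = d.getD p 0 + (vals.countP (fun seq => decide (p ∈ pvWindowsB ps ls seq)) : Int) := by
  induction vals generalizing d with
  | nil => simp
  | cons seq rest ih =>
    rw [List.foldl_cons, ih, PySem.Dict.getD_foldl_modify_add_one]
    have hcount : (PySem.Set.ofList (pvWindowsB ps ls seq)).count p
        = if p ∈ pvWindowsB ps ls seq then 1 else 0 := by
      by_cases hm : p ∈ pvWindowsB ps ls seq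
      · rw [List.count_eq_one_of_mem (PySem.Set.nodup_ofList _)
          ((PySem.Set.mem_ofList _ _).mpr hm)]
        simp [hm]
      · rw [List.count_eq_zero_of_not_mem (fun hc => hm ((PySem.Set.mem_ofList _ _).mp hc))]
        simp [hm]
    rw [hcount, List.countP_cons]
    by_cases hm : p ∈ pvWindowsB ps ls seq
    · simp [hm]; ring
    · simp [hm]

-- window characterisation: for a peptide of the indexed lengths, membership in the
-- window set of seq is exactly Python's 'p in seq'
theorem pv_mem_windows (peptides : List String) (seq p : String) (hp : p ∈ peptides) :
    p ∈ pvWindowsB (PySem.Set.ofList peptides)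
        (PySem.Set.ofList ((PySem.Set.ofList peptides).map (fun q => PySem.Str.len q))) seq
      ↔ PySem.Str.isIn p seq = true := by
  have hps : p ∈ PySem.Set.ofList peptides := (PySem.Set.mem_ofList _ _).mpr hp
  constructor
  · rintro hmem
    rcases List.mem_flatMap.mp hmem with ⟨l, hl, hpl⟩
    rcases List.mem_filter.mp hpl with ⟨hpm, _⟩
    rcases List.mem_map.mp hpm with ⟨i, hi, hslice⟩
    rcases (PySem.List.mem_pyRange_one).mp hi with ⟨hi0, hilt⟩
    have hl0 : 0 ≤ l := by
      rcases (PySem.Set.mem_ofList _ _).mp hl with hlm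
      rcases List.mem_map.mp hlm with ⟨q, _, rfl⟩
      rw [PySem.Str.len_eq]; positivity
    -- p is the window seq[i:i+l], an infix of seq
    have htl : p.toList = ((seq.toList.drop i.toNat).take (((i + l)).toNat - i.toNat)) := by
      rw [← hslice]
      have : (PySem.Str.slice seq (some i) (some (i + l))).toList
          = PySem.List.slice seq.toList (some i) (some (i + l)) := by
        simp [PySem.Str.slice]
      rw [this, PySem.List.slice_toNat seq.toList hi0 (by omega)]
    apply (PySem.Str.isIn_iff_infix _ _).mpr
    rw [htl]
    exact List.IsInfix.trans ((List.take_prefix _ _).isInfix) ((List.drop_suffix _ _).isInfix)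
  · intro hin
    rcases (PySem.Str.isIn_iff_infix _ _).mp hin with ⟨u, v, huv⟩
    apply List.mem_flatMap.mpr
    refine ⟨PySem.Str.len p, ?_, ?_⟩
    · exact (PySem.Set.mem_ofList _ _).mpr (List.mem_map_of_mem hps)
    · apply List.mem_filter.mpr
      constructor
      · apply List.mem_map.mpr
        refine ⟨(u.length : Int), ?_, ?_⟩
        · apply (PySem.List.mem_pyRange_one).mpr
          constructor
          · positivity
          · have hlen : u.length + p.toList.length ≤ seq.toList.length := by
              rw [← huv]; simp only [List.length_append]; omega
            rw [PySem.Str.len_eq, PySem.Str.len_eq]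
            omega
        · apply String.toList_inj.mp
          have h0 : (0:Int) ≤ (u.length : Int) := by positivity
          have h1 : (0:Int) ≤ (u.length : Int) + PySem.Str.len p := by
            rw [PySem.Str.len_eq]; positivity
          have : (PySem.Str.slice seq (some (u.length : Int))
                (some ((u.length : Int) + PySem.Str.len p))).toList
              = PySem.List.slice seq.toList (some (u.length : Int))
                (some ((u.length : Int) + PySem.Str.len p)) := by
            simp [PySem.Str.slice]
          rw [this, PySem.List.slice_toNat seq.toList h0 h1, ← huv]
          have htn : ((u.length : Int) + PySem.Str.len p).toNat - (u.length : Int).toNat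
              = p.toList.length := by
            rw [PySem.Str.len_eq]; omega
          rw [htn]
          have hd : ((u ++ p.toList ++ v).drop ((u.length : Int)).toNat)
              = p.toList ++ v := by
            rw [Int.toNat_natCast, List.append_assoc, List.drop_left]
          rw [hd, List.take_left]
      · simp [PySem.Set.contains, hps]

-- ===== VERDICT (by name: the statement is the Claim_ definition above) =====
theorem check_proteotypicity_spec : Claim_equal_check_proteotypicity := by
  intro peptides all_sequences _
  show check_proteotypicity peptides all_sequences
      = check_proteotypicity_alt peptides all_sequences
  unfold check_proteotypicity check_proteotypicity_alt
  rw [pv_a_eq_filter]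
  apply Eq.symm
  apply List.filter_congr
  intro p hp
  rw [pv_counts]
  have hempty : (PySem.Dict.empty : PySem.Dict String Int).getD p 0 = 0 := by
    simp [PySem.Dict.getD, PySem.Dict.get?, PySem.Dict.empty]
  rw [hempty, zero_add]
  have hcongr : ((PySem.Dict.ofList all_sequences).values).countP
        (fun seq => decide (p ∈ pvWindowsB (PySem.Set.ofList peptides)
          (PySem.Set.ofList ((PySem.Set.ofList peptides).map (fun q => PySem.Str.len q))) seq))
      = ((PySem.Dict.ofList all_sequences).values).countP
        (fun seq => PySem.Str.isIn p seq) := by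
    apply List.countP_congr
    intro seq _
    by_cases hm : p ∈ pvWindowsB (PySem.Set.ofList peptides)
        (PySem.Set.ofList ((PySem.Set.ofList peptides).map (fun q => PySem.Str.len q))) seq
    · rw [decide_eq_true hm, (pv_mem_windows peptides seq p hp).mp hm]
    · rw [decide_eq_false hm]
      cases h2 : PySem.Str.isIn p seq with
      | false => rfl
      | true => exact absurd ((pv_mem_windows peptides seq p hp).mpr h2) hm
  rw [hcongr]
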